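-- pv_equiv track=rewrite | github.com/antikov/AoC2017 | day 13/solution.py | get_caught
-- ===== SOURCE A (Python) =====
-- def get_caught(second, depth):
--     x = 1
--     pos = 0
--     for i in range(second):
--         pos += x
--
--         if pos == depth:
--             x = -1
--         if pos == 0:
--             x = 1
--     if pos == 0:
--         return True
--     return False
-- ===== SOURCE B (Python) =====
-- def get_caught(second, depth):
--     # Closed form: the scanner position is a triangle wave of period 2*depth,
--     # hitting 0 exactly at multiples of 2*depth.
--     if second <= 0:
--         return True
--     if depth <= 0:
--         return False
--     return second % (2 * depth) == 0
-- ===== Notes on version B (the rewrite author's own statement) =====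
-- stated objective: faster
-- what changed: Replaces the per-second simulation of the bouncing scanner with the closed-form periodicity test second % (2*depth) == 0 (with nonpositive second/depth handled directly).
import Mathlib
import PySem

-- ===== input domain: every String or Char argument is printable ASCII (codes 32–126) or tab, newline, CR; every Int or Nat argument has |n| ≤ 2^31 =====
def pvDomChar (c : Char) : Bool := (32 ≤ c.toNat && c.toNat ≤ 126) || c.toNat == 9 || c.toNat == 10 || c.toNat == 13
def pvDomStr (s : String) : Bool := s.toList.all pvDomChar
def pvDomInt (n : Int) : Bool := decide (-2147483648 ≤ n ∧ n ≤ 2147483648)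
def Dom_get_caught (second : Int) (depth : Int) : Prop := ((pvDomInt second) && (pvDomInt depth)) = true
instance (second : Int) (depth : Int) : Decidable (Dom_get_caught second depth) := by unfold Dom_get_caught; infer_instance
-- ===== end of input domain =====

-- B replaces A's per-second simulation by the closed-form periodicity test
-- second % (2*depth) == 0 (objective: faster, O(1) instead of O(second)).

-- ===== PORT A =====
-- one iteration of A's for-loop body on the state (x, pos)
def pvStepA (depth : Int) (s : Int × Int) : Int × Int :=
  let pos := s.2 + s.1
  let x1 := if pos = depth then -1 else s.1
  let x2 := if pos = 0 then 1 else x1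
  (x2, pos)

def get_caught (second : Int) (depth : Int) : Bool :=
  let st := (PySem.List.pyRange 0 second 1).foldl (fun s _ => pvStepA depth s) (1, 0)
  st.2 == 0

-- ===== PORT B =====
def get_caught_alt (second : Int) (depth : Int) : Bool :=
  if second ≤ 0 then true
  else if depth ≤ 0 then false
  else PySem.Int.mod second (2 * depth) == 0

-- ===== PRECONDITION & SPEC =====
def Spec_get_caught (second : Int) (depth : Int) (out : Bool) : Prop := out = get_caught_alt second depth
instance (second : Int) (depth : Int) (out : Bool) : Decidable (Spec_get_caught second depth out) := by unfold Spec_get_caught; infer_instance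

-- ===== CLAIM (what is proved, stated in full; the proofs are below) =====
def Claim_equal_get_caught : Prop := ∀ (second : Int) (depth : Int), Dom_get_caught second depth → Spec_get_caught second depth (get_caught second depth)

-- ===== LEMMAS AND PROOFS =====

theorem pv_foldl_const {α β : Type} (f : β → β) (l : List α) (init : β) :
    l.foldl (fun s _ => f s) init = f^[l.length] init := by
  induction l generalizing init with
  | nil => rfl
  | cons a t ih => simp [List.foldl_cons, ih, Function.iterate_succ_apply]

theorem pv_iter_nonpos (depth : Int) (hd : depth ≤ 0) (n : Nat) :
    (pvStepA depth)^[n] (1, 0) = (1, (n : Int)) := by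
  induction n with
  | zero => simp
  | succ n ih =>
    rw [Function.iterate_succ_apply', ih]
    simp only [pvStepA]
    push_cast
    split_ifs <;> simp_all <;> omega

theorem pv_iter_pos (depth : Int) (hd : 1 ≤ depth) (n : Nat) :
    (pvStepA depth)^[n] (1, 0) =
      (if (n : Int) % (2 * depth) < depth then 1 else -1,
       if (n : Int) % (2 * depth) ≤ depth then (n : Int) % (2 * depth)
       else 2 * depth - (n : Int) % (2 * depth)) := by
  induction n with
  | zero =>
    simp only [Function.iterate_zero, id_eq, Nat.cast_zero]
    rw [Int.zero_emod]
    split_ifs <;> first | rfl | omega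
  | succ n ih =>
    rw [Function.iterate_succ_apply', ih]
    simp only [pvStepA]
    have h1 : 0 ≤ (n : Int) % (2 * depth) := Int.emod_nonneg _ (by omega)
    have h2 : (n : Int) % (2 * depth) < 2 * depth := Int.emod_lt_of_pos _ (by omega)
    have hone : (1 : Int) % (2 * depth) = 1 := Int.emod_eq_of_lt (by norm_num) (by omega)
    have e1 : ((n : Int) + 1) % (2 * depth) = ((n : Int) % (2 * depth) + 1) % (2 * depth) := by
      rw [Int.add_emod, hone]
    have h4 : ((n : Int) + 1) % (2 * depth) = (n : Int) % (2 * depth) + 1 ∨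
        (((n : Int) + 1) % (2 * depth) = 0 ∧ (n : Int) % (2 * depth) = 2 * depth - 1) := by
      by_cases hr : (n : Int) % (2 * depth) + 1 = 2 * depth
      · exact Or.inr ⟨by rw [e1, hr, Int.emod_self], by omega⟩
      · exact Or.inl (by rw [e1]; exact Int.emod_eq_of_lt (by omega) (by omega))
    have h1c : 0 ≤ ((n : Int) + 1) % (2 * depth) := Int.emod_nonneg _ (by omega)
    have h2c : ((n : Int) + 1) % (2 * depth) < 2 * depth := Int.emod_lt_of_pos _ (by omega)
    push_cast
    simp only [Prod.mk.injEq]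
    generalize hC : ((n : Int) + 1) % (2 * depth) = c at h1c h2c h4 ⊢
    generalize hR : (n : Int) % (2 * depth) = r at h1 h2 h4 ⊢
    rcases h4 with h4 | ⟨h4a, h4b⟩ <;> exact ⟨by split_ifs <;> omega, by split_ifs <;> omega⟩

theorem get_caught_spec' (second : Int) (depth : Int) :
    get_caught second depth = get_caught_alt second depth := by
  unfold get_caught get_caught_alt
  by_cases hs : second ≤ 0
  · rw [PySem.List.pyRange_one_eq_nil (by omega)]
    simp [hs]
  · have hsn : ((second.toNat : Int)) = second := Int.toNat_of_nonneg (by omega)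
    rw [pv_foldl_const, PySem.List.length_pyRange_one]
    have hlen : (second - 0).toNat = second.toNat := by omega
    rw [hlen]
    by_cases hd : depth ≤ 0
    · rw [pv_iter_nonpos depth hd]
      simp only [hsn]
      simp [hs, hd]
      omega
    · rw [pv_iter_pos depth (by omega)]
      simp only [hsn]
      have hm : PySem.Int.mod second (2 * depth) = second % (2 * depth) :=
        PySem.Int.mod_eq_emod_of_pos (by omega)
      have h1 : 0 ≤ second % (2 * depth) := Int.emod_nonneg _ (by omega)
      have h2 : second % (2 * depth) < 2 * depth := Int.emod_lt_of_pos _ (by omega)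
      simp only [hs, if_neg, hd, if_false, hm]
      split_ifs with h <;> simp <;> omega

-- ===== VERDICT (by name: the statement is the Claim_ definition above) =====
theorem get_caught_spec : Claim_equal_get_caught := by
  intro second depth _
  exact get_caught_spec' second depth
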